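-- pv_equiv track=rewrite | github.com/darkbarker/pybarker | pybarker/django/forms/fields.py | sanitize_separators
-- ===== SOURCE A (Python) =====
-- def sanitize_separators(value):
--     if isinstance(value, str):
--         parts = []
--         # DECIMAL_SEPARATOR
--         decimal_separator = ","
--         if decimal_separator in value:
--             value, decimals = value.split(decimal_separator, 1)
--             parts.append(decimals)
--         # THOUSAND_SEPARATOR
--         for replacement in {" ", "'", "`"}:
--             value = value.replace(replacement, "")
--         parts.append(value)
--         value = ".".join(reversed(parts))
--     return value
-- ===== SOURCE B (Python) =====
-- def sanitize_separators(value):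
--     # Single left-to-right pass: before the first comma, drop thousand
--     # separators; the first comma becomes '.'; everything after it is verbatim.
--     if not isinstance(value, str):
--         return value
--     out = []
--     seen_decimal = False
--     for ch in value:
--         if seen_decimal:
--             out.append(ch)
--         elif ch == ",":
--             seen_decimal = True
--             out.append(".")
--         elif ch in (" ", "'", "`"):
--             pass
--         else:
--             out.append(ch)
--     return "".join(out)
-- ===== Notes on version B (the rewrite author's own statement) =====
-- stated objective: simpler
-- what changed: One character-by-character pass with a seen_decimal flag replaces A's split-on-first-comma, three whole-string replace passes and reversed-join reassembly.
import Mathlib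
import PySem

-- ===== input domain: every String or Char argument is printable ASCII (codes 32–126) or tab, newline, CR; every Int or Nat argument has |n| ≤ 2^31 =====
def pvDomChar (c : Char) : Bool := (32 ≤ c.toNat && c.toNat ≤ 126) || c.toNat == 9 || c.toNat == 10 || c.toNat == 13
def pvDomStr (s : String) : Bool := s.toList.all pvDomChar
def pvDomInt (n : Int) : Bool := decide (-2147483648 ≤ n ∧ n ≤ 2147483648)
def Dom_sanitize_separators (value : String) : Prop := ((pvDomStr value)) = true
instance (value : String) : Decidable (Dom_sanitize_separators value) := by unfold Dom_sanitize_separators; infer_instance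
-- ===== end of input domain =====

-- B replaces A's split / three replace passes / reversed-join with one single pass over the
-- characters carrying a seen_decimal flag; same return value, objective: simpler.

-- ===== PORT A =====
-- the 'for replacement in {" ", "'", "`"}' loop: three successive replaces (removing distinct
-- single characters commutes, so the set's iteration order cannot change the result)
def pvReplaceSeps (v : List Char) : List Char :=
  PySem.Chars.replace (PySem.Chars.replace (PySem.Chars.replace v [' '] []) ['\''] []) ['`'] []

def sanitize_separators (value : String) : String :=
  let cs := value.toList
  if PySem.Chars.isIn [','] cs then
    -- value, decimals = value.split(",", 1); parts = [decimals]
    let pieces := PySem.Chars.splitOnMax cs [','] 1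
    let v := pieces.headI
    let decimals := pieces.tail.headI
    -- parts.append(value); ".".join(reversed(parts))
    String.ofList (PySem.Chars.join ['.'] [pvReplaceSeps v, decimals])
  else
    String.ofList (PySem.Chars.join ['.'] [pvReplaceSeps cs])

-- ===== PORT B =====
def sanitize_separators_alt (value : String) : String :=
  String.ofList
    ((value.toList.foldl
      (fun (st : List Char × Bool) ch =>
        if st.2 then (st.1 ++ [ch], st.2)
        else if ch = ',' then (st.1 ++ ['.'], true)
        else if ch = ' ' ∨ ch = '\'' ∨ ch = '`' then st
        else (st.1 ++ [ch], st.2))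
      ([], false)).1)

-- ===== PRECONDITION & SPEC =====
def Spec_sanitize_separators (value : String) (out : String) : Prop := out = sanitize_separators_alt value
instance (value : String) (out : String) : Decidable (Spec_sanitize_separators value out) := by unfold Spec_sanitize_separators; infer_instance

-- ===== CLAIM (what is proved, stated in full; the proofs are below) =====
def Claim_equal_sanitize_separators : Prop := ∀ (value : String), Dom_sanitize_separators value → Spec_sanitize_separators value (sanitize_separators value)

-- ===== LEMMAS AND PROOFS =====

-- reference form both ports are reduced to
def pvSan : List Char → List Char
  | [] => []
  | c :: rest =>
    if c = ',' then '.' :: rest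
    else if c = ' ' ∨ c = '\'' ∨ c = '`' then pvSan rest
    else c :: pvSan rest

def pvStrip (cs : List Char) : List Char :=
  ((cs.filter (· ≠ ' ')).filter (· ≠ '\'')).filter (· ≠ '`')

theorem pvStrip_cons_sep (c : Char) (hs : c = ' ' ∨ c = '\'' ∨ c = '`') (l : List Char) :
    pvStrip (c :: l) = pvStrip l := by
  rcases hs with h | h | h <;> subst h <;> simp [pvStrip]

theorem pvStrip_cons_keep (c : Char) (hs : ¬(c = ' ' ∨ c = '\'' ∨ c = '`')) (l : List Char) :
    pvStrip (c :: l) = c :: pvStrip l := by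
  rw [not_or, not_or] at hs
  simp [pvStrip, hs.1, hs.2.1, hs.2.2]

-- replace with a single-char old and empty new is a filter
theorem pv_replace_go_filter (c : Char) :
    ∀ (fuel : Nat) (cs acc : List Char), cs.length ≤ fuel →
      PySem.Chars.replace.go [c] [] fuel cs acc = acc.reverse ++ cs.filter (· ≠ c) := by
  intro fuel
  induction fuel with
  | zero =>
    intro cs acc h
    have : cs = [] := List.length_eq_zero_iff.mp (Nat.le_zero.mp h)
    subst this
    simp [PySem.Chars.replace.go]
  | succ n ih =>
    intro cs acc h
    cases cs with
    | nil => simp [PySem.Chars.replace.go]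
    | cons x t =>
      by_cases hx : x = c
      · subst hx
        have hpre : [x].isPrefixOf (x :: t) = true := by simp [List.isPrefixOf]
        simp only [PySem.Chars.replace.go, hpre, if_true, List.length_cons, List.length_nil,
          Nat.zero_add, List.drop_succ_cons, List.drop_zero, List.reverse_nil, List.nil_append]
        rw [ih t acc (by simpa using Nat.le_of_succ_le_succ h)]
        simp
      · have hpre : [c].isPrefixOf (x :: t) = false := by
          simp [List.isPrefixOf]; exact fun h' => hx h'.symm
        simp only [PySem.Chars.replace.go, hpre, Bool.false_eq_true, if_false]
        rw [ih t (x :: acc) (by simpa using Nat.le_of_succ_le_succ h)]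
        simp [hx]

theorem pv_replace_filter (c : Char) (cs : List Char) :
    PySem.Chars.replace cs [c] [] = cs.filter (· ≠ c) := by
  simp only [PySem.Chars.replace, List.isEmpty_cons, Bool.false_eq_true, if_false]
  simpa using pv_replace_go_filter c cs.length cs [] (le_refl _)

theorem pvReplaceSeps_eq (cs : List Char) : pvReplaceSeps cs = pvStrip cs := by
  simp [pvReplaceSeps, pvStrip, pv_replace_filter]

-- splitOnMax.go with maxsplit exhausted returns the rest as one piece
theorem pv_split_go_zero :
    ∀ (fuel : Nat) (cs cur : List Char) (acc : List (List Char)),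
      PySem.Chars.splitOnMax.go [','] fuel 0 cs cur acc
        = (( cur.reverse ++ cs) :: acc).reverse := by
  intro fuel
  induction fuel with
  | zero => intro cs cur acc; simp [PySem.Chars.splitOnMax.go]
  | succ n _ =>
    intro cs cur acc
    cases cs with
    | nil => simp [PySem.Chars.splitOnMax.go]
    | cons x t => simp [PySem.Chars.splitOnMax.go]

-- splitOnMax.go with maxsplit 1: split at the first comma, if any
theorem pv_split_go_one :
    ∀ (fuel : Nat) (cs cur : List Char) (acc : List (List Char)), cs.length < fuel →
      PySem.Chars.splitOnMax.go [','] fuel 1 cs cur acc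
        = if ',' ∈ cs then
            acc.reverse ++ [cur.reverse ++ cs.takeWhile (· ≠ ','), (cs.dropWhile (· ≠ ',')).tail]
          else acc.reverse ++ [cur.reverse ++ cs] := by
  intro fuel
  induction fuel with
  | zero => intro cs cur acc h; exact absurd h (Nat.not_lt_zero _)
  | succ n ih =>
    intro cs cur acc h
    cases cs with
    | nil => simp [PySem.Chars.splitOnMax.go]
    | cons x t =>
      by_cases hx : x = ','
      · subst hx
        have hpre : [','].isPrefixOf (',' :: t) = true := by simp [List.isPrefixOf]
        simp only [PySem.Chars.splitOnMax.go, hpre, if_true, List.length_cons, List.length_nil,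
          Nat.zero_add, List.drop_succ_cons, List.drop_zero]
        rw [if_neg (by norm_num)]
        rw [pv_split_go_zero n t [] (cur.reverse :: acc)]
        simp
      · have hpre : [','].isPrefixOf (x :: t) = false := by
          simp [List.isPrefixOf]; exact fun h' => hx h'.symm
        simp only [PySem.Chars.splitOnMax.go, hpre, Bool.false_eq_true, if_false]
        rw [if_neg (by norm_num)]
        rw [ih t (x :: cur) acc (by simpa using Nat.lt_of_succ_lt_succ h)]
        by_cases hm : ',' ∈ t
        · simp [hx, hm, Ne.symm hx]
        · simp [hm, Ne.symm hx]

theorem pv_splitOnMax_one (cs : List Char) :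
    PySem.Chars.splitOnMax cs [','] 1
      = if ',' ∈ cs then [cs.takeWhile (· ≠ ','), (cs.dropWhile (· ≠ ',')).tail]
        else [cs] := by
  simp only [PySem.Chars.splitOnMax]
  rw [if_neg (by norm_num)]
  have h := pv_split_go_one (cs.length + 1) cs [] [] (by omega)
  simpa using h

-- pvSan characterised by the first comma
theorem pvSan_eq_split (cs : List Char) :
    pvSan cs = if ',' ∈ cs then
        pvStrip (cs.takeWhile (· ≠ ',')) ++ '.' :: (cs.dropWhile (· ≠ ',')).tail
      else pvStrip cs := by
  induction cs with
  | nil => simp [pvSan, pvStrip]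
  | cons c rest ih =>
    by_cases hc : c = ','
    · subst hc
      simp [pvSan, pvStrip]
    · by_cases hs : c = ' ' ∨ c = '\'' ∨ c = '`'
      · simp only [pvSan, if_neg hc, if_pos hs, ih]
        by_cases hm : ',' ∈ rest
        · simp [hm, Ne.symm hc, hc, pvStrip_cons_sep c hs]
        · simp [hm, Ne.symm hc, pvStrip_cons_sep c hs]
      · simp only [pvSan, if_neg hc, if_neg hs, ih]
        by_cases hm : ',' ∈ rest
        · simp [hm, Ne.symm hc, hc, pvStrip_cons_keep c hs]
        · simp [hm, Ne.symm hc, pvStrip_cons_keep c hs]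

-- A computes pvSan
theorem pvA_eq (value : String) :
    sanitize_separators value = String.ofList (pvSan value.toList) := by
  unfold sanitize_separators
  rw [pvSan_eq_split]
  by_cases hm : ',' ∈ value.toList
  · have hin : PySem.Chars.isIn [','] value.toList = true := by
      rw [PySem.Chars.isIn_iff_infix]
      exact (List.singleton_infix_iff ',' value.toList).mpr hm
    simp only [hin, if_pos]
    rw [pv_splitOnMax_one, if_pos hm]
    simp [PySem.Chars.join, List.intercalate, List.intersperse, pvReplaceSeps_eq, hm]
  · have hin : PySem.Chars.isIn [','] value.toList = false := by
      rw [PySem.Chars.isIn_eq_false_iff]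
      exact fun h => hm ((List.singleton_infix_iff ',' value.toList).mp h)
    simp only [hin, Bool.false_eq_true, if_false]
    simp [PySem.Chars.join, List.intercalate, List.intersperse, pvReplaceSeps_eq, hm]

-- B's fold after the decimal point copies verbatim
theorem pvB_true (cs : List Char) :
    ∀ (out : List Char),
      cs.foldl (fun (st : List Char × Bool) ch =>
        if st.2 then (st.1 ++ [ch], st.2)
        else if ch = ',' then (st.1 ++ ['.'], true)
        else if ch = ' ' ∨ ch = '\'' ∨ ch = '`' then st
        else (st.1 ++ [ch], st.2)) (out, true) = (out ++ cs, true) := by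
  induction cs with
  | nil => intro out; simp
  | cons c rest ih => intro out; simp [ih]

-- B's fold before the decimal point computes pvSan
theorem pvB_false (cs : List Char) :
    ∀ (out : List Char),
      (cs.foldl (fun (st : List Char × Bool) ch =>
        if st.2 then (st.1 ++ [ch], st.2)
        else if ch = ',' then (st.1 ++ ['.'], true)
        else if ch = ' ' ∨ ch = '\'' ∨ ch = '`' then st
        else (st.1 ++ [ch], st.2)) (out, false)).1 = out ++ pvSan cs := by
  induction cs with
  | nil => intro out; simp [pvSan]
  | cons c rest ih =>
    intro out
    by_cases hc : c = ','
    · subst hc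
      simp only [List.foldl_cons]
      rw [pvSan]
      simp [pvB_true]
    · by_cases hs : c = ' ' ∨ c = '\'' ∨ c = '`'
      · simp only [List.foldl_cons]
        rw [pvSan]
        simp only [Bool.false_eq_true, if_false, if_neg hc, if_pos hs]
        exact ih out
      · simp only [List.foldl_cons]
        rw [pvSan]
        simp only [Bool.false_eq_true, if_false, if_neg hc, if_neg hs]
        rw [ih (out ++ [c])]
        simp

theorem pvB_eq (value : String) :
    sanitize_separators_alt value = String.ofList (pvSan value.toList) := by
  unfold sanitize_separators_alt
  rw [pvB_false value.toList []]
  simp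

-- ===== VERDICT (by name: the statement is the Claim_ definition above) =====
theorem sanitize_separators_spec : Claim_equal_sanitize_separators := by
  intro value _
  unfold Spec_sanitize_separators
  rw [pvA_eq, pvB_eq]
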